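-- pv_equiv track=rewrite | github.com/jiangsiwei2018/BigData | data_common/spark/hbase_util.py | row2dict
-- ===== SOURCE A (Python) =====
-- def row2dict(row):
--     """
--     将标准格式转换成字典格式
--     ('0001', {'data:grade': '7-1', 'data:school': 'SZZX', 'info:name': 'Tom', 'info:sex': 'male'})
--     转换成：
--     ('0001', {'info': {'name': 'Jack', 'sex': 'female'}, 'data': {'school': 'SXZX-1', 'grade': '7-2'}}),
--     :param row_key:
--     :param row_data:
--     :return:
--     """
--     row_key = row[0]
--     row_data = row[1]
--     _dict = {}
--     for k, v in row_data.items():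
--         f, c = k.split(':')
--         if f not in _dict:
--             _dict[f] = {}
--         _dict[f][c] = v
--     return row_key, _dict
-- ===== SOURCE B (Python) =====
-- def row2dict(row):
--     row_key, row_data = row
--     triples = []
--     for k, v in row_data.items():
--         f, c = k.split(':')
--         triples.append((f, c, v))
--     families = dict.fromkeys(f for f, _, _ in triples)
--     return row_key, {f: {c: v for g, c, v in triples if g == f}
--                      for f in families}
-- ===== Notes on version B (the rewrite author's own statement) =====
-- stated objective: alternative
-- what changed: Replaced the single streaming accumulate-with-guard loop over a dict-of-dicts by a two-phase decomposition: flatten every item to a (family, column, value) triple, compute the family order with dict.fromkeys, then assemble the result with nested comprehensions filtering the triples per family.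
import Mathlib
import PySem

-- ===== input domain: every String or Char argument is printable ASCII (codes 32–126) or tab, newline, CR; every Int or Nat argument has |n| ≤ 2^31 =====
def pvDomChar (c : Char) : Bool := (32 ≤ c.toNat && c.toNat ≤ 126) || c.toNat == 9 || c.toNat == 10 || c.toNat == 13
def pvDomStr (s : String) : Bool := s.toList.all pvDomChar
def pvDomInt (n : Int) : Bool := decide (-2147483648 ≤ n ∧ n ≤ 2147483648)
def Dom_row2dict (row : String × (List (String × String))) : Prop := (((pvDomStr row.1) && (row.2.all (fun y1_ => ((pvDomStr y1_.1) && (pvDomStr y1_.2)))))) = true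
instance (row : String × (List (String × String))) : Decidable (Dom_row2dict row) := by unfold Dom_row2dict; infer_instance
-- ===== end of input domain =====

-- B replaces A's streaming guarded dict-of-dicts loop by a two-phase shape (flatten to
-- (family, column, value) triples, then group per family by filtering); alternative, not faster.

-- ===== PORT A =====
-- the loop body: f, c = k.split(':'); if f not in _dict: _dict[f] = {}; _dict[f][c] = v
-- (on keys without exactly one colon Python raises ValueError; the port leaves the dict
-- unchanged there — such inputs are excluded by Pre_row2dict)
def row2dictStep (d : PySem.Dict String (PySem.Dict String String)) (kv : String × String) :
    PySem.Dict String (PySem.Dict String String) :=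
  match PySem.Str.split? kv.1 ":" with
  | some [f, c] =>
      let d1 := if d.contains f then d else d.insert f PySem.Dict.empty
      d1.insert f ((d1.getD f PySem.Dict.empty).insert c kv.2)
  | _ => d

def row2dict (row : String × (List (String × String))) : String × (List (String × List (String × String))) :=
  (row.1, ((row.2.foldl row2dictStep PySem.Dict.empty).items.map (fun p => (p.1, p.2.items))))

-- ===== PORT B =====
-- for k, v in row_data.items(): f, c = k.split(':'); triples.append((f, c, v))
-- (same totality guard as in port A: a malformed key appends nothing; excluded by Pre_row2dict)
def row2dictTStep (acc : List (String × String × String)) (kv : String × String) :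
    List (String × String × String) :=
  match PySem.Str.split? kv.1 ":" with
  | some [f, c] => acc ++ [(f, c, kv.2)]
  | _ => acc

def row2dictTriples (row_data : List (String × String)) : List (String × String × String) :=
  row_data.foldl row2dictTStep []

def row2dict_alt (row : String × (List (String × String))) : String × (List (String × List (String × String))) :=
  let triples := row2dictTriples row.2
  let families := PySem.List.dedup (triples.map (fun t => t.1))       -- dict.fromkeys(...)
  (row.1,
    (PySem.Dict.ofList (families.map (fun f =>
      (f, (PySem.Dict.ofList ((triples.filter (fun t => t.1 == f)).map (fun t => (t.2.1, t.2.2)))).items)))).items)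

-- ===== PRECONDITION & SPEC =====
-- Pre_ excludes rows with a key that does not contain exactly one ':' — Python A raises
-- ValueError (tuple unpacking of k.split(':')) on those inputs.
def Pre_row2dict (row : String × (List (String × String))) : Prop :=
  ∀ kv ∈ row.2, ((PySem.Str.split? kv.1 ":").getD []).length = 2
instance (row : String × (List (String × String))) : Decidable (Pre_row2dict row) := by unfold Pre_row2dict; infer_instance
def pvWitness_row2dict : (String × (List (String × String))) :=
  ("0001", [("data:grade", "7-1"), ("data:school", "SZZX"), ("info:name", "Tom")])

def Spec_row2dict (row : String × (List (String × String))) (out : String × (List (String × List (String × String)))) : Prop := out = row2dict_alt row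
instance (row : String × (List (String × String))) (out : String × (List (String × List (String × String)))) : Decidable (Spec_row2dict row out) := by unfold Spec_row2dict; infer_instance

-- ===== CLAIM (what is proved, stated in full; the proofs are below) =====
def Claim_equal_row2dict : Prop := ∀ (row : String × (List (String × String))), Dom_row2dict row → Pre_row2dict row → Spec_row2dict row (row2dict row)

-- ===== LEMMAS AND PROOFS =====

-- the simplified (guard-free) step used for reasoning about port A
def row2dictStep' (d : PySem.Dict String (PySem.Dict String String)) (t : String × String × String) :
    PySem.Dict String (PySem.Dict String String) :=
  d.insert t.1 ((d.getD t.1 PySem.Dict.empty).insert t.2.1 t.2.2)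

lemma row2dictStep_eq (d : PySem.Dict String (PySem.Dict String String)) (kv : String × String)
    (f c : String) (h : PySem.Str.split? kv.1 ":" = some [f, c]) :
    row2dictStep d kv = row2dictStep' d (f, c, kv.2) := by
  unfold row2dictStep row2dictStep'
  rw [h]
  by_cases hc : d.contains f = true
  · simp [hc]
  · simp only [Bool.not_eq_true] at hc
    simp [hc, PySem.Dict.insert_insert_self, PySem.Dict.getD_insert_self,
      PySem.Dict.getD_of_not_contains d _ hc]

lemma row2dictTStep_eq_append (acc : List (String × String × String)) (kv : String × String) :
    row2dictTStep acc kv = acc ++ row2dictTStep [] kv := by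
  unfold row2dictTStep
  rcases hs : PySem.Str.split? kv.1 ":" with _ | (_ | ⟨a, _ | ⟨b, _ | _⟩⟩) <;> simp

lemma foldl_tstep_acc (l : List (String × String)) (acc : List (String × String × String)) :
    l.foldl row2dictTStep acc = acc ++ l.foldl row2dictTStep [] := by
  induction l generalizing acc with
  | nil => simp
  | cons kv rest ih =>
      rw [List.foldl_cons, List.foldl_cons, ih, ih (row2dictTStep [] kv),
        row2dictTStep_eq_append acc kv, List.append_assoc]

lemma row2dictTriples_cons (kv : String × String) (l : List (String × String)) (f c : String)
    (h : PySem.Str.split? kv.1 ":" = some [f, c]) :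
    row2dictTriples (kv :: l) = (f, c, kv.2) :: row2dictTriples l := by
  unfold row2dictTriples
  rw [List.foldl_cons, foldl_tstep_acc]
  unfold row2dictTStep
  rw [h]
  simp

lemma foldl_step_eq_triples (l : List (String × String))
    (h : ∀ kv ∈ l, ((PySem.Str.split? kv.1 ":").getD []).length = 2)
    (d : PySem.Dict String (PySem.Dict String String)) :
    l.foldl row2dictStep d = (row2dictTriples l).foldl row2dictStep' d := by
  induction l generalizing d with
  | nil => simp [row2dictTriples]
  | cons kv rest ih =>
      have h2 := h kv (List.mem_cons_self ..)
      obtain ⟨f, c, hfc⟩ : ∃ f c, PySem.Str.split? kv.1 ":" = some [f, c] := by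
        rcases hs : PySem.Str.split? kv.1 ":" with _ | parts
        · rw [hs] at h2; simp at h2
        · rw [hs] at h2; simp only [Option.getD_some] at h2
          obtain ⟨f, c, rfl⟩ := List.length_eq_two.mp h2
          exact ⟨f, c, rfl⟩
      rw [row2dictTriples_cons kv rest f c hfc, List.foldl_cons, List.foldl_cons,
        row2dictStep_eq d kv f c hfc]
      exact ih (fun x hx => h x (List.mem_cons_of_mem _ hx)) _

lemma getD_foldl_step' (l : List (String × String × String))
    (d : PySem.Dict String (PySem.Dict String String)) (f : String) :
    (l.foldl row2dictStep' d).getD f PySem.Dict.empty =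
      (l.filter (fun t => t.1 == f)).foldl
        (fun inn t => inn.insert t.2.1 t.2.2) (d.getD f PySem.Dict.empty) := by
  induction l generalizing d with
  | nil => simp
  | cons t rest ih =>
      rw [List.foldl_cons, ih]
      by_cases hf : t.1 = f
      · subst hf
        simp [row2dictStep', PySem.Dict.getD_insert_self]
      · have hb : (t.1 == f) = false := by simp [hf]
        simp only [List.filter_cons, hb, Bool.false_eq_true, if_neg, not_false_eq_true]
        congr 1
        unfold row2dictStep'
        exact PySem.Dict.getD_insert_of_ne d _ _ (Ne.symm hf)

lemma keys_foldl_step' (l : List (String × String × String)) :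
    (l.foldl row2dictStep' PySem.Dict.empty).keys = PySem.List.dedup (l.map (fun t => t.1)) := by
  have h := PySem.Dict.keys_foldl_insert_key (l := l) (key := fun t => t.1)
    (f := fun d t => (d.getD t.1 PySem.Dict.empty).insert t.2.1 t.2.2) (d := PySem.Dict.empty)
  unfold row2dictStep'
  rw [h]
  simp [PySem.Dict.keys_empty, PySem.Set.update_nil_left]

lemma nodup_keys_foldl_step' (l : List (String × String × String)) :
    (l.foldl row2dictStep' PySem.Dict.empty).keys.Nodup := by
  unfold row2dictStep'
  exact PySem.Dict.nodup_keys_foldl_insert_key l (fun t => t.1) _ _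
    (by simp [PySem.Dict.keys_empty])

-- ===== VERDICT (by name: the statement is the Claim_ definition above) =====
theorem row2dict_spec : Claim_equal_row2dict := by
  intro row _hdom hpre
  unfold Spec_row2dict
  set tr := row2dictTriples row.2 with htr
  set fams := PySem.List.dedup (tr.map (fun t => t.1)) with hfams
  set inner : String → List (String × String) := fun f =>
    (PySem.Dict.ofList ((tr.filter (fun t => t.1 == f)).map (fun t => (t.2.1, t.2.2)))).items
    with hinner
  show (row.1, ((row.2.foldl row2dictStep PySem.Dict.empty).items.map (fun p => (p.1, p.2.items))))
      = (row.1, (PySem.Dict.ofList (fams.map (fun f => (f, inner f)))).items)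
  rw [foldl_step_eq_triples row.2 hpre, ← htr]
  set D := tr.foldl row2dictStep' PySem.Dict.empty with hD
  -- A side: rebuild D.items from its (nodup) keys
  have hitems : D.items = D.keys.map (fun k => (k, D.getD k PySem.Dict.empty)) :=
    PySem.Dict.items_eq_map_keys D (nodup_keys_foldl_step' tr) PySem.Dict.empty
  have hkeys : D.keys = fams := keys_foldl_step' tr
  -- B side: the outer dict comprehension inserts fresh distinct family keys, so its
  -- items are exactly the mapped list it was built from
  have hnd : fams.Nodup := hfams ▸ PySem.List.nodup_dedup (tr.map (fun t => t.1))
  have hfresh := PySem.Dict.items_foldl_insert_fresh (l := fams) (k := fun f => f)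
    (v := fun f => inner f) (d := PySem.Dict.empty)
    (fun a _ => by simp [PySem.Dict.contains_empty]) (by simpa using hnd)
  simp only [] at hfresh
  have hofl : PySem.Dict.ofList (fams.map (fun f => (f, inner f)))
      = fams.foldl (fun d f => d.insert f (inner f)) PySem.Dict.empty := by
    show (fams.map _).foldl _ _ = _
    rw [List.foldl_map]
  rw [hofl, hfresh, hitems, hkeys, List.map_map]
  refine congrArg (fun z => (row.1, z)) ?_
  have hempty : (PySem.Dict.empty : PySem.Dict String (List (String × String))).items = [] := rfl
  rw [hempty, List.nil_append]
  refine List.map_congr_left (fun f _hf => ?_)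
  simp only [Function.comp]
  congr 1
  -- inner dict for family f: A's accumulated inner dict is B's per-family comprehension
  rw [hD, getD_foldl_step' tr PySem.Dict.empty f, hinner]
  show (((tr.filter (fun t => t.1 == f)).foldl (fun inn t => inn.insert t.2.1 t.2.2)
      (PySem.Dict.empty.getD f PySem.Dict.empty)).items)
    = (PySem.Dict.ofList ((tr.filter (fun t => t.1 == f)).map (fun t => (t.2.1, t.2.2)))).items
  rw [show PySem.Dict.ofList ((tr.filter (fun t => t.1 == f)).map (fun t => (t.2.1, t.2.2))) =
        ((tr.filter (fun t => t.1 == f)).map (fun t => (t.2.1, t.2.2))).foldl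
          (fun d p => d.insert p.1 p.2) PySem.Dict.empty from rfl]
  rw [List.foldl_map]
  simp [PySem.Dict.getD_empty]
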